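-- pv_equiv track=rewrite | github.com/Antara-Basu/Design-and-Testing-Entropy-Sources-using-NIST-SP-800-90B-Standard | 11_codes_of_iid_determination.py | int_con
-- ===== SOURCE A (Python) =====
-- def calculate_decimal_value(bin):
--
--   """
--   This function partitions the input sequence into 8-bit non-overblocking blocks and calculates the integer value of each block.
--   @input: s:string of binary integers.
--   @output:result :TEST STATISTIC.
--   For eg:
--   input = s = [1,0,1,1,0,1,1,1,0,0,1,1,1,0,1,1,0,0,1,1]
--   lst of 8-blocks = [[1,0,1,1,0,1,1,1],[0,0,1,1,1,0,1,1],[0,0,1,1,0,0,0,0]]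
--   now integer value of each 8-bit block will be calculated and will be appended into a list.
--   output lst = [183, 59, 48]
--
--   """
--
--   bin = bin[::-1]
--   decimal = 0
--   for power in range(len(bin)):
--       decimal += bin[power] * (2**power)
--   return decimal
--
-- def int_con(bin):
--   grps = [bin[i:i+8] for i in range(0, len(bin), 8)]
--   result = []
--   ans = 0
--   for grp in grps:
--       if(len(grp) == 8):
--           ans = calculate_decimal_value(grp)
--       else:
--           while(len(grp) < 8):
--               grp.append(0)
--           ans = calculate_decimal_value(grp)
--       result.append(ans)
--   return result
-- ===== SOURCE B (Python) =====
-- def int_con(bin):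
--     result = []
--     for i in range(0, len(bin), 8):
--         grp = bin[i:i+8]
--         val = 0
--         for b in grp:
--             val = val * 2 + b
--         val <<= 8 - len(grp)
--         result.append(val)
--     return result
-- ===== Notes on version B (the rewrite author's own statement) =====
-- stated objective: simpler
-- what changed: Replaces the reverse-and-sum-of-powers helper and the while-loop zero-padding with a single pass: each 8-element slice is evaluated left-to-right by Horner's rule and a short final block is left-shifted by the missing bit count instead of being padded by appending zeros.
import Mathlib
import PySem

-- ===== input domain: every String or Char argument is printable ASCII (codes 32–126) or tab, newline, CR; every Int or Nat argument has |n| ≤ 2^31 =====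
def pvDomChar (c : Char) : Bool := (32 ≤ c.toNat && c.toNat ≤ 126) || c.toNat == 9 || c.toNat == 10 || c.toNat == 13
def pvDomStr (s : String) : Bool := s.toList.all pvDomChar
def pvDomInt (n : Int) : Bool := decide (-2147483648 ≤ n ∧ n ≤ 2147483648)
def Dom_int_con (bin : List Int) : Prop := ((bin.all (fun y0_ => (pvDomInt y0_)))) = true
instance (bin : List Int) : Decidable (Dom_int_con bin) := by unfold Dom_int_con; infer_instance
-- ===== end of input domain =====

-- B replaces the reverse/power-sum helper and the append-zeros padding loop with a single
-- left-to-right Horner evaluation per block plus a left shift for the short final block (objective: simpler).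

-- ===== PORT A =====
-- helper calculate_decimal_value: bin = bin[::-1]; decimal += bin[power] * 2**power over range(len(bin))
def calculate_decimal_value (bin : List Int) : Int :=
  let b := bin.reverse
  (PySem.List.pyRange 0 (b.length : Int) 1).foldl
    (fun decimal power => decimal + PySem.List.pyGetD b power 0 * 2 ^ power.toNat) 0
  -- pyGetD is exact here: every index drawn from range(len(b)) is in range

-- the 'while len(grp) < 8: grp.append(0)' loop of A
def padLoop (grp : List Int) : List Int :=
  if grp.length < 8 then padLoop (grp ++ [0]) else grp
  termination_by 8 - grp.length
  decreasing_by simp; omega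

def int_con (bin : List Int) : List Int :=
  let grps := (PySem.List.pyRange 0 (bin.length : Int) 8).map
    (fun i => PySem.List.slice bin (some i) (some (i + 8)))
  (grps.foldl
    (fun (st : List Int × Int) grp =>
      let ans := if grp.length = 8 then calculate_decimal_value grp
                 else calculate_decimal_value (padLoop grp)
      (st.1 ++ [ans], ans))
    ([], 0)).1

-- ===== PORT B =====
-- val = 0; for b in grp: val = val*2 + b
def hornerVal (grp : List Int) : Int :=
  grp.foldl (fun val b => val * 2 + b) 0

def int_con_alt (bin : List Int) : List Int :=
  (PySem.List.pyRange 0 (bin.length : Int) 8).foldl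
    (fun result i =>
      let grp := PySem.List.slice bin (some i) (some (i + 8))
      result ++ [hornerVal grp <<< (8 - grp.length)])
    []

-- ===== PRECONDITION & SPEC =====
def Spec_int_con (bin : List Int) (out : List Int) : Prop := out = int_con_alt bin
instance (bin : List Int) (out : List Int) : Decidable (Spec_int_con bin out) := by unfold Spec_int_con; infer_instance

-- ===== CLAIM (what is proved, stated in full; the proofs are below) =====
def Claim_equal_int_con : Prop := ∀ (bin : List Int), Dom_int_con bin → Spec_int_con bin (int_con bin)

-- ===== LEMMAS AND PROOFS =====

-- little-endian value of a bit list: lowVal (x :: xs) = x + 2 * lowVal xs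
def lowVal : List Int → Int
  | [] => 0
  | x :: xs => x + 2 * lowVal xs

theorem hornerVal_foldl (g : List Int) (c : Int) :
    g.foldl (fun val b => val * 2 + b) c = c * 2 ^ g.length + lowVal g.reverse := by
  induction g generalizing c with
  | nil => simp [lowVal]
  | cons x xs ih =>
      rw [List.foldl_cons, ih, List.reverse_cons]
      have : ∀ l : List Int, lowVal (l ++ [x]) = lowVal l + 2 ^ l.length * x := by
        intro l
        induction l with
        | nil => simp [lowVal]
        | cons y ys ih2 => simp [lowVal, ih2, pow_succ]; ring
      rw [this]
      simp [pow_succ]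
      ring

theorem hornerVal_eq_lowVal (g : List Int) : hornerVal g = lowVal g.reverse := by
  simpa using hornerVal_foldl g 0

theorem sum_range_getD (b : List Int) :
    ((List.range b.length).map (fun k => b.getD k 0 * 2 ^ k)).sum = lowVal b := by
  induction b with
  | nil => simp [lowVal]
  | cons x xs ih =>
      rw [List.length_cons, List.range_succ_eq_map, List.map_cons, List.map_map, List.sum_cons]
      have : (List.range xs.length).map ((fun k => (x :: xs).getD k 0 * 2 ^ k) ∘ Nat.succ)
           = (List.range xs.length).map (fun k => 2 * (xs.getD k 0 * 2 ^ k)) := by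
        apply List.map_congr_left
        intro k _
        simp [Function.comp, List.getD, pow_succ]
        ring
      rw [this, List.sum_map_mul_left, ih, lowVal]
      simp

theorem calc_eq (g : List Int) : calculate_decimal_value g = lowVal g.reverse := by
  unfold calculate_decimal_value
  rw [PySem.List.foldl_add, PySem.List.pyRange_zero_nat, List.map_map]
  have : (List.range g.reverse.length).map
        ((fun power => PySem.List.pyGetD g.reverse power 0 * 2 ^ power.toNat) ∘ (fun k : Nat => (k : Int)))
      = (List.range g.reverse.length).map (fun k => g.reverse.getD k 0 * 2 ^ k) := by
    apply List.map_congr_left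
    intro k _
    simp [Function.comp, PySem.List.pyGetD_of_nonneg g.reverse (i := (k : Int)) 0 (Int.natCast_nonneg k)]
  rw [this, sum_range_getD]
  simp

theorem padLoop_eq (g : List Int) (h : g.length ≤ 8) :
    padLoop g = g ++ List.replicate (8 - g.length) 0 := by
  rw [padLoop]
  split_ifs with hlt
  · rw [padLoop_eq (g ++ [0]) (by simp; omega)]
    have : (8 : Nat) - g.length = (8 - (g ++ [0]).length) + 1 := by simp; omega
    rw [this, List.append_assoc]
    simp [List.replicate_succ]
  · have : (8 : Nat) - g.length = 0 := by omega
    simp [this]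
  termination_by 8 - g.length
  decreasing_by simp; omega

theorem lowVal_replicate_zero (m : Nat) (l : List Int) :
    lowVal (List.replicate m 0 ++ l) = 2 ^ m * lowVal l := by
  induction m with
  | zero => simp
  | succ n ih => simp [List.replicate_succ, lowVal, ih, pow_succ]; ring

-- per-group equality: A's branchy padded power-sum equals B's shifted Horner value
theorem group_eq (g : List Int) (h : g.length ≤ 8) :
    (if g.length = 8 then calculate_decimal_value g else calculate_decimal_value (padLoop g))
      = hornerVal g <<< (8 - g.length) := by
  rw [Int.shiftLeft_eq, hornerVal_eq_lowVal]
  split_ifs with h8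
  · simp [h8, calc_eq]
  · rw [padLoop_eq g h, calc_eq, List.reverse_append, List.reverse_replicate,
        lowVal_replicate_zero]
    ring

theorem fold_eq (is : List Int) (bin : List Int) (h : ∀ i ∈ is, 0 ≤ i)
    (res : List Int) (ans : Int) :
    ((is.map (fun i => PySem.List.slice bin (some i) (some (i + 8)))).foldl
        (fun (st : List Int × Int) grp =>
          let ans := if grp.length = 8 then calculate_decimal_value grp
                     else calculate_decimal_value (padLoop grp)
          (st.1 ++ [ans], ans))
        (res, ans)).1
    = is.foldl
        (fun result i =>
          let grp := PySem.List.slice bin (some i) (some (i + 8))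
          result ++ [hornerVal grp <<< (8 - grp.length)])
        res := by
  induction is generalizing res ans with
  | nil => simp
  | cons i is ih =>
      have hi : 0 ≤ i := h i (by simp)
      have hlen : (PySem.List.slice bin (some i) (some (i + 8))).length ≤ 8 := by
        rw [PySem.List.slice_toNat bin hi (by omega)]
        calc (List.take ((i + 8).toNat - i.toNat) (List.drop i.toNat bin)).length
            ≤ (i + 8).toNat - i.toNat := List.length_take_le _ _
          _ ≤ 8 := by omega
      simp only [List.map_cons, List.foldl_cons]
      rw [ih (fun j hj => h j (by simp [hj]))]
      rw [group_eq _ hlen]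

-- ===== VERDICT (by name: the statement is the Claim_ definition above) =====
theorem int_con_spec : Claim_equal_int_con := by
  intro bin _
  unfold Spec_int_con int_con int_con_alt
  rw [fold_eq]
  intro i hi
  exact ((PySem.List.mem_pyRange_iff_of_pos (by norm_num) i).1 hi).1
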